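-- pv_equiv track=rewrite | github.com/jrrickerson/adventofcode2022 | python/day-10/utils.py | format_crt_string
-- ===== SOURCE A (Python) =====
-- def format_crt_string(crt_values, cols=40):
--     """Given a list of crt pixel values (True or False), create a string
--     representing a 40-pixel wide screen, with "#" indicating a lit pixel
--     and "." indicating an unlit pixel."""
--     chars = []
--     for i, value in enumerate(crt_values, start=1):
--         if value:
--             chars.append("#")
--         else:
--             chars.append(".")
--         if i % cols == 0:
--             chars.append("\n")
--     return ''.join(chars)
-- ===== SOURCE B (Python) =====
-- def format_crt_string(crt_values, cols=40):
--     """Given a list of crt pixel values (True or False), create a string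
--     representing a 40-pixel wide screen, with "#" indicating a lit pixel
--     and "." indicating an unlit pixel."""
--     s = ''.join('#' if v else '.' for v in crt_values)
--     parts = []
--     for i in range(0, len(s), cols):
--         row = s[i:i + cols]
--         parts.append(row)
--         if len(row) == cols:
--             parts.append('\n')
--     return ''.join(parts)
-- ===== Notes on version B (the rewrite author's own statement) =====
-- stated objective: alternative
-- what changed: B builds the full pixel string first and then chunks it into fixed-width rows by slicing at range(0, len, cols), instead of A's single interleaved pass that appends a newline whenever a 1-based modulo counter hits the row width.
-- outside the precondition, e.g. on format_crt_string([True, False], 0): A raises ZeroDivisionError, B raises ValueError; on format_crt_string([True, False], -1): A returns '#\n.\n', B returns ''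
import Mathlib
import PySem

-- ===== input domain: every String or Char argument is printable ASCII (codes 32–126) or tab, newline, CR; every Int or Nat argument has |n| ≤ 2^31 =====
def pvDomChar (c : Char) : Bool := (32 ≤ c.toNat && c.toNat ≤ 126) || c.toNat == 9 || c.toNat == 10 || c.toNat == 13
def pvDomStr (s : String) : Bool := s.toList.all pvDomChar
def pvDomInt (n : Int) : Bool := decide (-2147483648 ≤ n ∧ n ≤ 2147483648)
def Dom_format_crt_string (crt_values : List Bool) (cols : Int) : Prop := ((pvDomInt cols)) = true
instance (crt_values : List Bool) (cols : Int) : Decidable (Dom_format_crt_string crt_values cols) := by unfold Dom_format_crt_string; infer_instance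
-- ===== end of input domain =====

-- B separates the value→char mapping from the fixed-width chunking (build the pixel string,
-- then slice it row by row) instead of interleaving newline decisions via a modulo counter;
-- objective: alternative decomposition, same cost.

-- ===== PORT A =====
def format_crt_string (crt_values : List Bool) (cols : Int) : String :=
  let chars := (PySem.List.enumerate crt_values 1).foldl
    (fun acc p =>
      let acc2 := acc ++ [if p.2 then "#" else "."]
      if PySem.Int.mod p.1 cols = 0 then acc2 ++ ["\n"] else acc2)
    ([] : List String)
  PySem.Str.join "" chars

-- ===== PORT B =====
def format_crt_string_alt (crt_values : List Bool) (cols : Int) : String :=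
  let s : String := String.ofList (crt_values.map (fun v => if v then '#' else '.'))
  let parts := (PySem.List.pyRange 0 (PySem.Str.len s) cols).foldl
    (fun acc i =>
      let row := PySem.Str.slice s (some i) (some (i + cols))
      let acc2 := acc ++ [row]
      if PySem.Str.len row = cols then acc2 ++ ["\n"] else acc2)
    ([] : List String)
  PySem.Str.join "" parts

-- ===== PRECONDITION & SPEC =====
-- Pre_ excludes cols = 0, where A raises ZeroDivisionError, and cols < 0 — a meaningless
-- negative screen width, where A's modulo test accidentally chunks by |cols| while B's
-- range-step loop naturally yields the empty string; both corner behaviours are accidental.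
def Pre_format_crt_string (crt_values : List Bool) (cols : Int) : Prop := 0 < cols
instance (crt_values : List Bool) (cols : Int) : Decidable (Pre_format_crt_string crt_values cols) := by unfold Pre_format_crt_string; infer_instance
def pvWitness_format_crt_string : List Bool × Int := ([true, false, true], 2)

def Spec_format_crt_string (crt_values : List Bool) (cols : Int) (out : String) : Prop := out = format_crt_string_alt crt_values cols
instance (crt_values : List Bool) (cols : Int) (out : String) : Decidable (Spec_format_crt_string crt_values cols out) := by unfold Spec_format_crt_string; infer_instance

-- ===== CLAIM (what is proved, stated in full; the proofs are below) =====
def Claim_equal_format_crt_string : Prop := ∀ (crt_values : List Bool) (cols : Int), Dom_format_crt_string crt_values cols → Pre_format_crt_string crt_values cols → Spec_format_crt_string crt_values cols (format_crt_string crt_values cols)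

-- ===== LEMMAS AND PROOFS =====

-- A's interleaved emission, as a structural recursion over the pixel chars with the 1-based counter.
def pvEmitA (cols : Int) : Int → List Char → List Char
  | _, [] => []
  | i, ch :: t =>
    ch :: (if PySem.Int.mod i cols = 0 then '\n' :: pvEmitA cols (i+1) t else pvEmitA cols (i+1) t)

-- B's chunking, recursion by whole rows of width c+1.
def pvChunks (c : Nat) : List Char → List Char
  | [] => []
  | x :: xs =>
    List.take (c+1) (x :: xs) ++
      (if c + 1 ≤ xs.length + 1 then '\n' :: pvChunks c (List.drop (c+1) (x :: xs)) else [])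
termination_by t => t.length
decreasing_by simp

lemma pvChunks_cons (c : Nat) (x : Char) (xs : List Char) :
    pvChunks c (x :: xs) =
      List.take (c+1) (x :: xs) ++
        (if c + 1 ≤ xs.length + 1 then '\n' :: pvChunks c (List.drop (c+1) (x :: xs)) else []) := by
  rw [pvChunks.eq_def]

lemma pvChunks_nil (c : Nat) : pvChunks c [] = [] := by
  rw [pvChunks.eq_def]

lemma pvEmitA_nil (cols i : Int) : pvEmitA cols i [] = [] := rfl

lemma pvEmitA_cons (cols i : Int) (ch : Char) (t : List Char) :
    pvEmitA cols i (ch :: t)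
      = ch :: (if PySem.Int.mod i cols = 0 then '\n' :: pvEmitA cols (i+1) t
               else pvEmitA cols (i+1) t) := rfl

lemma pvJoinNil (xss : List (List Char)) : PySem.Chars.join [] xss = xss.flatten := by
  induction xss with
  | nil => rfl
  | cons p rest ih =>
    cases rest with
    | nil => simp [PySem.Chars.join_singleton]
    | cons q r => rw [PySem.Chars.join_cons_cons, ih]; simp

lemma pvRange_pos_nil (a b s : Int) (hs : 0 < s) (h : b ≤ a) :
    PySem.List.pyRange a b s = [] := by
  rw [PySem.List.pyRange_of_pos _ _ hs]
  simp [not_lt.mpr h]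

lemma pvRange_pos_cons (a b s : Int) (hs : 0 < s) (hab : a < b) :
    PySem.List.pyRange a b s = a :: PySem.List.pyRange (a + s) b s := by
  rw [PySem.List.pyRange_of_pos _ _ hs, PySem.List.pyRange_of_pos _ _ hs]
  rw [if_pos hab]
  by_cases h2 : a + s < b
  · rw [if_pos h2]
    have hx : b - a + s - 1 = (b - (a+s) + s - 1) + 1 * s := by ring
    have hdiv : (b - a + s - 1) / s = (b - (a+s) + s - 1) / s + 1 := by
      rw [hx, Int.add_mul_ediv_right _ _ (ne_of_gt hs)]
    have hnn : 0 ≤ (b - (a+s) + s - 1) / s := Int.ediv_nonneg (by omega) hs.le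
    have htn : ((b - a + s - 1) / s).toNat = ((b - (a+s) + s - 1) / s).toNat + 1 := by omega
    rw [htn, List.range_succ_eq_map]
    simp only [List.map_cons, List.map_map, Nat.cast_zero, mul_zero, add_zero]
    refine congrArg (a :: ·) ?_
    apply List.map_congr_left
    intro k _
    simp [Function.comp]
    ring
  · rw [if_neg h2]
    have h1 : (b - a + s - 1) / s = 1 := by
      have hlo : 1 ≤ (b - a + s - 1) / s := by
        rw [Int.le_ediv_iff_mul_le hs]; omega
      have hhi : (b - a + s - 1) / s < 2 := by
        rw [Int.ediv_lt_iff_lt_mul hs]; omega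
      omega
    rw [h1]
    simp

-- the modulo counter, one row at a time: starting j chars into a row (0 ≤ j ≤ c), A emits the
-- remaining c+1-j chars, then a newline exactly when the row is complete, then continues.
lemma pvRow (c : Nat) (q : Int) (s : List Char) : ∀ (j : Nat), j ≤ c →
    pvEmitA ((c:Int)+1) (q*((c:Int)+1) + (j:Int) + 1) s
      = List.take (c+1-j) s ++
        (if c+1-j ≤ s.length then
          '\n' :: pvEmitA ((c:Int)+1) ((q+1)*((c:Int)+1) + 1) (List.drop (c+1-j) s)
        else []) := by
  induction s with
  | nil =>
    intro j hj
    simp [pvEmitA_nil]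
    omega
  | cons ch t ih =>
    intro j hj
    rw [pvEmitA_cons]
    have hmod : PySem.Int.mod (q*((c:Int)+1) + (j:Int) + 1) ((c:Int)+1) = ((j:Int)+1) % ((c:Int)+1) := by
      have hw : (0:Int) < (c:Int)+1 := by positivity
      have hrw : q*((c:Int)+1) + (j:Int) + 1 = ((j:Int)+1) + ((c:Int)+1) * q := by ring
      rw [PySem.Int.mod, Int.fmod_eq_emod, hrw, Int.add_mul_emod_self_left]
      simp [hw.le]
    by_cases hjc : j = c
    · rw [if_pos (show PySem.Int.mod (q*((c:Int)+1) + (j:Int) + 1) ((c:Int)+1) = 0 by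
        rw [hmod, hjc]; exact Int.emod_self)]
      have h1 : c + 1 - j = 1 := by omega
      have harg : q*((c:Int)+1) + (j:Int) + 1 + 1 = (q+1)*((c:Int)+1) + 1 := by
        rw [hjc]; ring
      rw [h1, harg]
      simp
    · have hlt : j < c := lt_of_le_of_ne hj hjc
      rw [if_neg (show ¬ PySem.Int.mod (q*((c:Int)+1) + (j:Int) + 1) ((c:Int)+1) = 0 by
        rw [hmod, Int.emod_eq_of_lt (by omega) (by omega)]
        omega)]
      have hstep : q*((c:Int)+1) + (j:Int) + 1 + 1 = q*((c:Int)+1) + ((j:Int)+1) + 1 := by ring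
      have hcast : ((j:Int)+1) = (((j+1 : Nat)):Int) := by push_cast; ring
      rw [hstep, hcast, ih (j+1) (by omega)]
      have h2 : c + 1 - j = (c + 1 - (j+1)) + 1 := by omega
      rw [h2]
      have h3 : (c + 1 - (j+1)) + 1 ≤ t.length + 1 ↔ c + 1 - (j+1) ≤ t.length := by omega
      by_cases hfits : c + 1 - (j+1) ≤ t.length
      · rw [if_pos hfits, if_pos (by simpa [h3] using hfits)]
        simp
      · rw [if_neg hfits, if_neg (by simpa [h3] using hfits)]
        simp

lemma pvAeqChunks (c : Nat) : ∀ (m : Nat) (s : List Char) (q : Int), s.length ≤ m →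
    pvEmitA ((c:Int)+1) (q*((c:Int)+1) + 1) s = pvChunks c s := by
  intro m
  induction m with
  | zero =>
    intro s q hm
    have : s = [] := List.eq_nil_of_length_eq_zero (by omega)
    subst this
    rw [pvChunks_nil, pvEmitA_nil]
  | succ m ih =>
    intro s q hm
    cases s with
    | nil => rw [pvChunks_nil, pvEmitA_nil]
    | cons x xs =>
      have h0 := pvRow c q (x :: xs) 0 (Nat.zero_le c)
      simp only [Nat.cast_zero, add_zero, Nat.sub_zero] at h0
      rw [h0, pvChunks_cons]
      by_cases hfull : c + 1 ≤ xs.length + 1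
      · rw [if_pos (by simpa using hfull), if_pos hfull]
        have := ih (List.drop (c+1) (x :: xs)) (q+1) (by simp at hm ⊢; omega)
        rw [this]
      · rw [if_neg (by simpa using hfull), if_neg hfull]

lemma pvAfold (cols : Int) (l : List Bool) : ∀ (i : Int) (acc : List String),
    ((((PySem.List.enumerate l i).foldl
      (fun acc p =>
        let acc2 := acc ++ [if p.2 then "#" else "."]
        if PySem.Int.mod p.1 cols = 0 then acc2 ++ ["\n"] else acc2) acc)).map String.toList).flatten
      = (acc.map String.toList).flatten ++ pvEmitA cols i (l.map (fun v => if v then '#' else '.')) := by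
  induction l with
  | nil => intro i acc; simp [PySem.List.enumerate_nil, pvEmitA]
  | cons v t ih =>
    intro i acc
    rw [PySem.List.enumerate_cons, List.foldl_cons]
    simp only []
    by_cases hm : PySem.Int.mod i cols = 0
    · rw [if_pos hm, ih]
      simp [pvEmitA, hm, show ("\n" : String).toList = ['\n'] from rfl]
      cases v <;> simp
    · rw [if_neg hm, ih]
      simp [pvEmitA, hm]
      cases v <;> simp

lemma pvBfold (c : Nat) (S : List Char) : ∀ (m k : Nat) (acc : List String), S.length - k ≤ m →
    (((PySem.List.pyRange (k:Int) (PySem.Str.len (String.ofList S)) ((c:Int)+1)).foldl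
      (fun acc i =>
        if PySem.Str.len (PySem.Str.slice (String.ofList S) (some i) (some (i + ((c:Int)+1)))) = (c:Int)+1 then
          acc ++ [PySem.Str.slice (String.ofList S) (some i) (some (i + ((c:Int)+1)))] ++ ["\n"]
        else acc ++ [PySem.Str.slice (String.ofList S) (some i) (some (i + ((c:Int)+1)))]) acc).map String.toList).flatten
      = (acc.map String.toList).flatten ++ pvChunks c (S.drop k) := by
  have hw : (0:Int) < (c:Int)+1 := by positivity
  have hlen : PySem.Str.len (String.ofList S) = (S.length : Int) := by
    simp [PySem.Str.len]
  intro m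
  induction m with
  | zero =>
    intro k acc hm
    rw [hlen, pvRange_pos_nil _ _ _ hw (by exact_mod_cast (by omega : S.length ≤ k)),
      List.foldl_nil, List.drop_eq_nil_of_le (by omega), pvChunks_nil, List.append_nil]
  | succ m ih =>
    intro k acc hm
    by_cases hk : k < S.length
    · rw [hlen, pvRange_pos_cons _ _ _ hw (by exact_mod_cast hk), List.foldl_cons]
      have hrow : PySem.Str.slice (String.ofList S) (some (k:Int)) (some ((k:Int) + ((c:Int)+1)))
          = String.ofList (List.take (c+1) (List.drop k S)) := by
        have hcast : ((c:Int)+1) = (((c+1 : Nat)):Int) := by push_cast; ring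
        simp only [PySem.Str.slice, PySem.Chars.slice, String.toList_ofList, hcast,
          PySem.List.slice_natCast_add]
      simp only [hrow]
      have hlenrow : PySem.Str.len (String.ofList (List.take (c+1) (List.drop k S)))
          = ((List.take (c+1) (List.drop k S)).length : Int) := by
        simp [PySem.Str.len]
      have hltake : (List.take (c+1) (List.drop k S)).length = min (c+1) (S.length - k) := by
        simp
      have hnext : (k:Int) + ((c:Int)+1) = (((k + (c+1) : Nat)):Int) := by push_cast; ring
      obtain ⟨x, xs, ht⟩ : ∃ x xs, S.drop k = x :: xs := by
        cases h : S.drop k with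
        | nil => exfalso; have := congrArg List.length h; simp at this; omega
        | cons x xs => exact ⟨x, xs, rfl⟩
      have hxlen : xs.length + 1 = S.length - k := by
        have := congrArg List.length ht; simp at this; omega
      have hdd : List.drop (c+1) (S.drop k) = S.drop (k + (c+1)) := by
        rw [List.drop_drop]
      have IH := fun (acc2 : List String) =>
        ih (k + (c+1)) acc2 (by omega : S.length - (k + (c+1)) ≤ m)
      simp only [hlen] at IH
      by_cases hfull : c + 1 ≤ S.length - k
      · rw [if_pos (by rw [hlenrow]; exact_mod_cast (by rw [hltake]; omega : (List.take (c+1) (List.drop k S)).length = c+1))]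
        rw [hnext]
        rw [IH (acc ++ [String.ofList (List.take (c+1) (List.drop k S))] ++ ["\n"])]
        rw [ht, pvChunks_cons, if_pos (by omega)]
        rw [← ht, hdd]
        simp [String.toList_ofList, show ("\n" : String).toList = ['\n'] from rfl, ht]
      · rw [if_neg (by rw [hlenrow]; exact_mod_cast (by rw [hltake]; omega : ¬ (List.take (c+1) (List.drop k S)).length = c+1))]
        rw [hnext]
        rw [IH (acc ++ [String.ofList (List.take (c+1) (List.drop k S))])]
        rw [ht, pvChunks_cons, if_neg (by omega)]
        rw [List.drop_eq_nil_of_le (by omega : S.length ≤ k + (c+1)), pvChunks_nil]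
        simp [String.toList_ofList]
    · rw [hlen, pvRange_pos_nil _ _ _ hw (by exact_mod_cast (by omega : S.length ≤ k)),
        List.foldl_nil, List.drop_eq_nil_of_le (by omega), pvChunks_nil, List.append_nil]

lemma pvA_eq (c : Nat) (l : List Bool) :
    format_crt_string l ((c:Int)+1)
      = String.ofList (pvChunks c (l.map (fun v => if v then '#' else '.'))) := by
  have hfold := pvAfold ((c:Int)+1) l 1 []
  simp only [List.map_nil, List.flatten_nil, List.nil_append] at hfold
  have hchunk := pvAeqChunks c (l.map (fun v => if v then '#' else '.')).length
    (l.map (fun v => if v then '#' else '.')) 0 le_rfl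
  simp only [zero_mul, zero_add] at hchunk
  simp only [format_crt_string, PySem.Str.join, show ("" : String).toList = [] from rfl,
    pvJoinNil, hfold, hchunk]

lemma pvB_eq (c : Nat) (l : List Bool) :
    format_crt_string_alt l ((c:Int)+1)
      = String.ofList (pvChunks c (l.map (fun v => if v then '#' else '.'))) := by
  have hB := pvBfold c (l.map (fun v => if v then '#' else '.'))
    (l.map (fun v => if v then '#' else '.')).length 0 [] (by omega)
  simp only [Nat.cast_zero, List.drop_zero, List.map_nil, List.flatten_nil,
    List.nil_append] at hB
  simp only [format_crt_string_alt, PySem.Str.join, show ("" : String).toList = [] from rfl,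
    pvJoinNil, hB]

-- ===== VERDICT (by name: the statement is the Claim_ definition above) =====
theorem format_crt_string_spec : Claim_equal_format_crt_string := by
  intro l cols _ hpre
  unfold Pre_format_crt_string at hpre
  unfold Spec_format_crt_string
  obtain ⟨c, rfl⟩ : ∃ c : Nat, cols = (c:Int)+1 := ⟨(cols - 1).toNat, by omega⟩
  rw [pvA_eq, pvB_eq]
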